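-- pv_equiv track=rewrite | github.com/kougioulis/project-euler | problem0112.py | is_not_bouncy
-- ===== SOURCE A (Python) =====
-- def is_not_bouncy(n):
--     if n < 100:
--         return True
--     else:
--         increasing, decreasing = False, False
--         prev_digit = n % 10
--         n = n // 10
--         while n > 0:
--             digit = n % 10
--             if prev_digit > digit:
--                 decreasing = True
--             elif prev_digit < digit:
--                 increasing = True
--             if increasing and decreasing:
--                 return False
--             prev_digit = digit
--             n = n // 10
--         return True
-- ===== SOURCE B (Python) =====
-- def is_not_bouncy(n):
--     if n < 100:
--         return True
--     s = str(n)
--     return s == ''.join(sorted(s)) or s == ''.join(sorted(s, reverse=True))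
-- ===== Notes on version B (the rewrite author's own statement) =====
-- stated objective: simpler
-- what changed: Replaced the digit-by-digit two-flag scan with early exit by a sort-and-compare over the digit string: non-bouncy iff str(n) equals its sorted or reverse-sorted form.
import Mathlib
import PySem

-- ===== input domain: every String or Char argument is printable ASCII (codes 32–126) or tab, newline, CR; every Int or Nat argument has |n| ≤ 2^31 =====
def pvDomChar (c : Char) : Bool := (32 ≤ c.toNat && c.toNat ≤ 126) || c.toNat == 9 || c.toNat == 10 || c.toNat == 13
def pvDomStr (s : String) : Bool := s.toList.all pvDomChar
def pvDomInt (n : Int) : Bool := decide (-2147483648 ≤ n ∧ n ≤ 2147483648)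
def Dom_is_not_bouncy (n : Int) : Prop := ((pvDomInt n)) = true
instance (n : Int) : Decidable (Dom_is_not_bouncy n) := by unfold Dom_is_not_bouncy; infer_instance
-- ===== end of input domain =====

-- B replaces A's two-flag digit scan by a sort-and-compare on str(n); equivalence proved for all ints.

-- ===== PORT A =====
-- termination helper for the while loop (cited by decreasing_by)
theorem pvFloordiv_ten_toNat_lt (n : Int) (h : 0 < n) :
    (PySem.Int.floordiv n 10).toNat < n.toNat := by
  rw [PySem.Int.floordiv_eq_ediv_of_pos (by norm_num)]
  omega

-- the while loop of A: state (n, prev_digit, increasing, decreasing)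
def pvLoopA (n prev : Int) (inc dec : Bool) : Bool :=
  if h : 0 < n then
    let digit := PySem.Int.mod n 10
    let dec' := if prev > digit then true else dec
    let inc' := if prev > digit then inc else if prev < digit then true else inc
    if inc' && dec' then false
    else pvLoopA (PySem.Int.floordiv n 10) digit inc' dec'
  else true
termination_by n.toNat
decreasing_by exact pvFloordiv_ten_toNat_lt n h

def is_not_bouncy (n : Int) : Bool :=
  if n < 100 then true
  else pvLoopA (PySem.Int.floordiv n 10) (PySem.Int.mod n 10) false false

-- ===== PORT B =====
-- ''.join(sorted(s)) is compared with s as lists of characters (exact: equal strings ↔ equal char lists)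
def is_not_bouncy_alt (n : Int) : Bool :=
  if n < 100 then true
  else
    let s := (PySem.Int.toStr n).toList
    (s == PySem.List.sorted s (fun c => c) false) || (s == PySem.List.sorted s (fun c => c) true)

-- ===== PRECONDITION & SPEC =====
def Spec_is_not_bouncy (n : Int) (out : Bool) : Prop := out = is_not_bouncy_alt n
instance (n : Int) (out : Bool) : Decidable (Spec_is_not_bouncy n out) := by unfold Spec_is_not_bouncy; infer_instance

-- ===== CLAIM (what is proved, stated in full; the proofs are below) =====
def Claim_equal_is_not_bouncy : Prop := ∀ (n : Int), Dom_is_not_bouncy n → Spec_is_not_bouncy n (is_not_bouncy n)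

-- ===== LEMMAS AND PROOFS =====

-- "some adjacent pair rises / falls" (lists are least-significant digit first)
def pvUp : List Int → Bool
  | a :: b :: t => (a < b) || pvUp (b :: t)
  | _ => false

def pvDown : List Int → Bool
  | a :: b :: t => (b < a) || pvDown (b :: t)
  | _ => false

def pvDigitsI (n : Int) : List Int := (Nat.digits 10 n.toNat).map Int.ofNat

theorem pvLoopA_eq (m : Nat) (prev : Int) (inc dec : Bool) (hnb : ¬(inc = true ∧ dec = true)) :
    pvLoopA (m : Int) prev inc dec
      = !((inc || pvUp (prev :: pvDigitsI m)) && (dec || pvDown (prev :: pvDigitsI m))) := by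
  induction m using Nat.strong_induction_on generalizing prev inc dec with
  | _ m ih =>
    rw [pvLoopA]
    by_cases hm : 0 < (m : Int)
    · have hm' : 0 < m := by exact_mod_cast hm
      have hdig : pvDigitsI ((m : Nat) : Int) = ((m % 10 : Nat) : Int) :: pvDigitsI (((m / 10 : Nat)) : Int) := by
        simp only [pvDigitsI, Int.toNat_natCast, Nat.digits_def' (by norm_num : 1 < 10) hm', List.map_cons, Int.ofNat_eq_natCast]
      have hmod : PySem.Int.mod (m : Int) 10 = ((m % 10 : Nat) : Int) := by
        exact_mod_cast PySem.Int.mod_natCast m 10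
      have hdiv : PySem.Int.floordiv (m : Int) 10 = ((m / 10 : Nat) : Int) := by
        exact_mod_cast PySem.Int.floordiv_natCast m 10
      have hlt : m / 10 < m := Nat.div_lt_self hm' (by norm_num)
      rw [dif_pos hm]
      simp only [hmod, hdiv, hdig]
      set d : Int := ((m % 10 : Nat) : Int) with hd
      rcases lt_trichotomy prev d with h1 | h1 | h1
      · have h2 : ¬ prev > d := not_lt.mpr h1.le
        cases dec
        · rw [ih (m / 10) hlt d (if prev > d then inc else if prev < d then true else inc)
              (if prev > d then true else false) (by simp [h1, h2])]
          simp [pvUp, pvDown, h1, h2]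
        · simp [pvUp, h1, h2]
      · have h2 : ¬ prev > d := by rw [h1]; exact lt_irrefl d
        have h3 : ¬ prev < d := by rw [h1]; exact lt_irrefl d
        rw [ih (m / 10) hlt d (if prev > d then inc else if prev < d then true else inc)
            (if prev > d then true else dec) (by simpa [h2, h3] using hnb)]
        have hb : ¬ (inc && dec) = true := by
          intro hb; exact hnb (by simpa using hb)
        simp [pvUp, pvDown, h1, h2, h3, hb]
      · have h2 : prev > d := h1
        cases inc
        · rw [ih (m / 10) hlt d (if prev > d then false else if prev < d then true else false)
              (if prev > d then true else dec) (by simp [h2])]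
          simp [pvUp, pvDown, h2, not_lt.mpr h2.le]
        · simp [pvUp, pvDown, h2, not_lt.mpr h2.le]
    · have hm0 : m = 0 := by omega
      subst hm0
      rw [dif_neg hm]
      simp only [pvDigitsI]
      simp [pvUp, pvDown]
      revert hnb; cases inc <;> cases dec <;> simp

-- pvUp l = false ↔ the list is weakly decreasing along adjacent pairs
theorem pvUp_eq_false_iff (l : List Int) : pvUp l = false ↔ l.IsChain (fun a b => b ≤ a) := by
  induction l with
  | nil => simp [pvUp, List.isChain_nil]
  | cons a t ih =>
    cases t with
    | nil => simp [pvUp, List.isChain_singleton]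
    | cons b t' =>
      rw [List.isChain_cons_cons]
      simp only [pvUp, Bool.or_eq_false_iff, decide_eq_false_iff_not, not_lt]
      exact and_congr Iff.rfl ih

theorem pvDown_eq_false_iff (l : List Int) : pvDown l = false ↔ l.IsChain (fun a b => a ≤ b) := by
  induction l with
  | nil => simp [pvDown, List.isChain_nil]
  | cons a t ih =>
    cases t with
    | nil => simp [pvDown, List.isChain_singleton]
    | cons b t' =>
      rw [List.isChain_cons_cons]
      simp only [pvDown, Bool.or_eq_false_iff, decide_eq_false_iff_not, not_lt]
      exact and_congr Iff.rfl ih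

-- Nat.toDigits (used by str(n)) produces the base-10 digits, most significant first
theorem pvToDigitsCore_eq (f : Nat) : ∀ (m : Nat) (l : List Char), 0 < m → m < f →
    Nat.toDigitsCore 10 f m l = ((Nat.digits 10 m).map Nat.digitChar).reverse ++ l := by
  induction f with
  | zero => intro m l h1 h2; omega
  | succ f ih =>
    intro m l h1 h2
    rw [Nat.toDigitsCore]
    by_cases hz : m / 10 = 0
    · simp only [hz, if_pos]
      rw [Nat.digits_def' (by norm_num : 1 < 10) h1, hz, Nat.digits_zero]
      simp
    · simp only [hz, if_neg, ite_false]
      rw [ih (m / 10) _ (Nat.pos_of_ne_zero hz) (by omega)]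
      rw [Nat.digits_def' (by norm_num : 1 < 10) h1]
      simp

theorem pvToDigits_eq (m : Nat) (h : 0 < m) :
    Nat.toDigits 10 m = ((Nat.digits 10 m).map Nat.digitChar).reverse := by
  have := pvToDigitsCore_eq (m + 1) m [] h (by omega)
  simpa [Nat.toDigits] using this

-- digitChar is an order embedding on digits < 10
theorem pvDigitChar_le_iff (a b : Nat) (ha : a < 10) (hb : b < 10) :
    Nat.digitChar a ≤ Nat.digitChar b ↔ a ≤ b := by
  interval_cases a <;> interval_cases b <;> simp <;> decide

theorem pvSorted_self_iff (l : List Char) :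
    (l == PySem.List.sorted l (fun c => c) false) = true ↔ l.Pairwise (fun a b => a ≤ b) := by
  constructor
  · intro h
    have he : l = PySem.List.sorted l (fun c => c) false := by simpa using h
    have := PySem.List.sorted_pairwise l (fun c => c) (κ := Char)
    rw [← he] at this
    simpa using this
  · intro h
    have := PySem.List.sorted_eq_self_of_pairwise (key := fun (c : Char) => c) (xs := l) (by simpa using h)
    simp [this]

theorem pvSortedRev_self_iff (l : List Char) :
    (l == PySem.List.sorted l (fun c => c) true) = true ↔ l.Pairwise (fun a b => b ≤ a) := by
  constructor
  · intro h
    have he : l = PySem.List.sorted l (fun c => c) true := by simpa using h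
    have := PySem.List.sorted_pairwise_rev l (fun c => c) (κ := Char)
    rw [← he] at this
    simpa using this
  · intro h
    have := PySem.List.sorted_rev_eq_self_of_pairwise (key := fun (c : Char) => c) (xs := l) (by simpa using h)
    simp [this]

-- ===== VERDICT (by name: the statement is the Claim_ definition above) =====
theorem is_not_bouncy_spec : Claim_equal_is_not_bouncy := by
  intro n _
  unfold Spec_is_not_bouncy is_not_bouncy is_not_bouncy_alt
  by_cases hn : n < 100
  · simp [hn]
  · obtain ⟨m, rfl⟩ : ∃ m : Nat, n = (m : Int) := ⟨n.toNat, by omega⟩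
    simp only [hn, if_false]
    have hm100 : 100 ≤ m := by omega
    have hmpos : 0 < m := by omega
    -- A side: the loop decides "no strict rise or no strict fall" over the digits
    have hdig : pvDigitsI ((m : Nat) : Int)
        = ((m % 10 : Nat) : Int) :: pvDigitsI (((m / 10 : Nat)) : Int) := by
      simp only [pvDigitsI, Int.toNat_natCast,
        Nat.digits_def' (by norm_num : 1 < 10) hmpos, List.map_cons, Int.ofNat_eq_natCast]
    have hmod : PySem.Int.mod (m : Int) 10 = ((m % 10 : Nat) : Int) := by
      exact_mod_cast PySem.Int.mod_natCast m 10
    have hdiv : PySem.Int.floordiv (m : Int) 10 = ((m / 10 : Nat) : Int) := by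
      exact_mod_cast PySem.Int.floordiv_natCast m 10
    have hA : pvLoopA (PySem.Int.floordiv (m : Int) 10) (PySem.Int.mod (m : Int) 10) false false
        = !(pvUp (pvDigitsI (m : Int)) && pvDown (pvDigitsI (m : Int))) := by
      rw [hmod, hdiv, pvLoopA_eq (m / 10) _ false false (by simp), hdig]
      simp
    rw [hA]
    -- B side: str(m) is the digit characters, most significant first
    have hchars : (PySem.Int.toStr (m : Int)).toList
        = ((Nat.digits 10 m).map Nat.digitChar).reverse := by
      rw [PySem.Int.toList_toStr]
      have h1 : PySem.Int.toChars (m : Int) = Nat.toDigits 10 m := by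
        simp [PySem.Int.toChars, not_lt.mpr (by positivity : (0:Int) ≤ (m : Int))]
      rw [h1, pvToDigits_eq m hmpos]
    simp only [hchars]
    -- digits are < 10
    have hlt10 : ∀ d ∈ Nat.digits 10 m, d < 10 := fun d hd => Nat.digits_lt_base (by norm_num) hd
    -- translate both sides into Pairwise over the natural digit list (LSB first)
    have hB1 : (((Nat.digits 10 m).map Nat.digitChar).reverse ==
        PySem.List.sorted ((Nat.digits 10 m).map Nat.digitChar).reverse (fun c => c) false) = true
        ↔ (Nat.digits 10 m).Pairwise (fun a b => b ≤ a) := by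
      rw [pvSorted_self_iff, List.pairwise_reverse, List.pairwise_map]
      constructor
      · exact fun h => h.imp_of_mem (fun {a b} ha hb hab =>
          (pvDigitChar_le_iff b a (hlt10 b hb) (hlt10 a ha)).mp hab)
      · exact fun h => h.imp_of_mem (fun {a b} ha hb hab =>
          (pvDigitChar_le_iff b a (hlt10 b hb) (hlt10 a ha)).mpr hab)
    have hB2 : (((Nat.digits 10 m).map Nat.digitChar).reverse ==
        PySem.List.sorted ((Nat.digits 10 m).map Nat.digitChar).reverse (fun c => c) true) = true
        ↔ (Nat.digits 10 m).Pairwise (fun a b => a ≤ b) := by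
      rw [pvSortedRev_self_iff, List.pairwise_reverse, List.pairwise_map]
      constructor
      · exact fun h => h.imp_of_mem (fun {a b} ha hb hab =>
          (pvDigitChar_le_iff a b (hlt10 a ha) (hlt10 b hb)).mp hab)
      · exact fun h => h.imp_of_mem (fun {a b} ha hb hab =>
          (pvDigitChar_le_iff a b (hlt10 a ha) (hlt10 b hb)).mpr hab)
    have hU : pvUp (pvDigitsI (m : Int)) = false ↔ (Nat.digits 10 m).Pairwise (fun a b => b ≤ a) := by
      rw [pvUp_eq_false_iff, ← List.isChain_iff_pairwise]
      simp only [pvDigitsI, Int.toNat_natCast]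
      rw [List.isChain_map]
      exact ⟨fun h => h.imp (fun {a b} hab => Int.ofNat_le.mp hab),
             fun h => h.imp (fun {a b} hab => Int.ofNat_le.mpr hab)⟩
    have hD : pvDown (pvDigitsI (m : Int)) = false ↔ (Nat.digits 10 m).Pairwise (fun a b => a ≤ b) := by
      rw [pvDown_eq_false_iff, ← List.isChain_iff_pairwise]
      simp only [pvDigitsI, Int.toNat_natCast]
      rw [List.isChain_map]
      exact ⟨fun h => h.imp (fun {a b} hab => Int.ofNat_le.mp hab),
             fun h => h.imp (fun {a b} hab => Int.ofNat_le.mpr hab)⟩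
    rw [Bool.eq_iff_iff, Bool.or_eq_true, hB1, hB2]
    rcases hu : pvUp (pvDigitsI (m : Int)) <;> rcases hdn : pvDown (pvDigitsI (m : Int))
    · exact iff_of_true (by simp) (Or.inl (hU.mp hu))
    · exact iff_of_true (by simp) (Or.inl (hU.mp hu))
    · exact iff_of_true (by simp) (Or.inr (hD.mp hdn))
    · apply iff_of_false (by simp)
      rintro (h | h)
      · rw [← hU] at h; simp [hu] at h
      · rw [← hD] at h; simp [hdn] at h
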